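-- pv_equiv track=rewrite | github.com/Yollandaa/Honours-Project | dynamic.py | analyze_runtime_data
-- ===== SOURCE A (Python) =====
-- def analyze_runtime_data(runtime_data):
--     call_sequences = []
--     current_sequence = []
--
--     for event in runtime_data:
--         if event["event"] == "call":
--             current_sequence.append(event["func_name"])
--         elif event["event"] == "return":
--             call_sequences.append(current_sequence)
--             current_sequence = []
--
--     return call_sequences
-- ===== SOURCE B (Python) =====
-- def analyze_runtime_data(runtime_data):
--     # Recursive decomposition: emit one sequence per 'return' event, building the
--     # result front-to-back by cons instead of appending to an accumulator list.
--     def go(events, seq):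
--         if not events:
--             return []
--         e, rest = events[0], events[1:]
--         if e["event"] == "return":
--             return [seq] + go(rest, [])
--         if e["event"] == "call":
--             return go(rest, seq + [e["func_name"]])
--         return go(rest, seq)
--     return go(runtime_data, [])
-- ===== Notes on version B (the rewrite author's own statement) =====
-- stated objective: alternative
-- what changed: Replaces A's imperative two-accumulator loop (mutating call_sequences and current_sequence) with a recursive split-on-return that constructs the output list front-to-back by cons, threading only the pending sequence.
import Mathlib
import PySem

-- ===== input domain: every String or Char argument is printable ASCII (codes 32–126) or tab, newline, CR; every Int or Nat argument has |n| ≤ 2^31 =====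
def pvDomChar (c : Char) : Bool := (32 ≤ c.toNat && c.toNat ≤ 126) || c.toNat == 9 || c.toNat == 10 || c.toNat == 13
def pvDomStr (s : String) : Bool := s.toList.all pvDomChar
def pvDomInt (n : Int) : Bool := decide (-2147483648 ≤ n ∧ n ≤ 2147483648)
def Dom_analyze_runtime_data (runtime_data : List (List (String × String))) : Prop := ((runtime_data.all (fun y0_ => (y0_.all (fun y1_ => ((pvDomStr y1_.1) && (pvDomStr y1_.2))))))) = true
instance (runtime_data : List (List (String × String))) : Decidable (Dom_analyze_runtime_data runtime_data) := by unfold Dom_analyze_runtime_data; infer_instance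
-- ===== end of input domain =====

-- B replaces A's imperative two-accumulator loop by a recursive split-on-return that
-- conses each finished sequence onto the recursive result (objective: alternative).

-- shared dict primitive: event["k"] (first-match lookup on the association list)
def pvLookup (e : List (String × String)) (k : String) : Option String :=
  (PySem.Dict.mk e).get? k

-- ===== PORT A =====
def analyze_runtime_data (runtime_data : List (List (String × String))) : List (List String) :=
  (runtime_data.foldl (fun (acc : List (List String) × List String) event =>
      if pvLookup event "event" = some "call" then
        (acc.1, acc.2 ++ [(pvLookup event "func_name").getD ""])
      else if pvLookup event "event" = some "return" then
        (acc.1 ++ [acc.2], [])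
      else acc)
    ([], [])).1

-- ===== PORT B =====
def pvGo : List (List (String × String)) → List String → List (List String)
  | [], _ => []
  | e :: rest, seq =>
    if pvLookup e "event" = some "return" then seq :: pvGo rest []
    else if pvLookup e "event" = some "call" then
      pvGo rest (seq ++ [(pvLookup e "func_name").getD ""])
    else pvGo rest seq

def analyze_runtime_data_alt (runtime_data : List (List (String × String))) : List (List String) :=
  pvGo runtime_data []

-- ===== PRECONDITION & SPEC =====
-- Pre_ excludes exactly the inputs where Python A raises KeyError: an event without an
-- "event" key, or a call event without a "func_name" key.
def Pre_analyze_runtime_data (runtime_data : List (List (String × String))) : Prop :=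
  ∀ e ∈ runtime_data, (pvLookup e "event").isSome ∧
    (pvLookup e "event" = some "call" → (pvLookup e "func_name").isSome)
instance (runtime_data : List (List (String × String))) : Decidable (Pre_analyze_runtime_data runtime_data) := by unfold Pre_analyze_runtime_data; infer_instance

def pvWitness_analyze_runtime_data : (List (List (String × String))) :=
  [[("event", "call"), ("func_name", "f")], [("event", "return")]]

def Spec_analyze_runtime_data (runtime_data : List (List (String × String))) (out : List (List String)) : Prop := out = analyze_runtime_data_alt runtime_data
instance (runtime_data : List (List (String × String))) (out : List (List String)) : Decidable (Spec_analyze_runtime_data runtime_data out) := by unfold Spec_analyze_runtime_data; infer_instance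

-- ===== CLAIM (what is proved, stated in full; the proofs are below) =====
def Claim_equal_analyze_runtime_data : Prop := ∀ (runtime_data : List (List (String × String))), Dom_analyze_runtime_data runtime_data → Pre_analyze_runtime_data runtime_data → Spec_analyze_runtime_data runtime_data (analyze_runtime_data runtime_data)

-- ===== LEMMAS AND PROOFS =====
-- loop invariant: A's fold from (seqs, cur) yields seqs ++ (B's recursion on cur)
theorem pv_fold_eq_go (l : List (List (String × String)))
    (seqs : List (List String)) (cur : List String) :
    (l.foldl (fun (acc : List (List String) × List String) event =>
      if pvLookup event "event" = some "call" then
        (acc.1, acc.2 ++ [(pvLookup event "func_name").getD ""])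
      else if pvLookup event "event" = some "return" then
        (acc.1 ++ [acc.2], [])
      else acc) (seqs, cur)).1 = seqs ++ pvGo l cur := by
  induction l generalizing seqs cur with
  | nil => simp [pvGo]
  | cons e rest ih =>
    by_cases hc : pvLookup e "event" = some "call"
    · simp [List.foldl, hc, pvGo, ih]
    · by_cases hr : pvLookup e "event" = some "return"
      · simp [List.foldl, hr, pvGo, ih]
      · simp [List.foldl, hc, hr, pvGo, ih]

-- ===== VERDICT (by name: the statement is the Claim_ definition above) =====
theorem analyze_runtime_data_spec : Claim_equal_analyze_runtime_data := by
  intro rd _ _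
  unfold Spec_analyze_runtime_data analyze_runtime_data analyze_runtime_data_alt
  simpa using pv_fold_eq_go rd [] []
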